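/- GENERATED by mk_final_copies.py from the proof of the farm's unit `start_decoder.F5a` (farm:start_decoder.F5a.1: Proof.lean) as the
   re-elaboration sweep compiled it — do not edit. -/
import Asan.CheckWalk
import Vorbis.Spec.Reader
import Vorbis.Spec.Units.start_decoder_F5a

open X86 X86.User Asan Vorbis Vorbis.Spec Vorbis.Spec.StartDecoder

set_option maxRecDepth 4000
set_option maxHeartbeats 4000000

namespace Vorbis.Spec.start_decoder_F5a

/-- **Segment F5a of `start_decoder`** (0x1155c7 … the cut point 0x1155d4 = `L.start_decoder.cut216`, C line 4002):
`mov esi,2 ; mov rdi,rbp ; call get_bits`. THE PATTERN of every piece of segment F5: the geometry as numbers (`In5.geo`), the walk,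
the callee's precondition (`Floor.reader_pre`, `Floor.bits_push`), after the return THE RECIPE (`v_after_call`, `ShadowUntouched`
BEFORE the own `hsame`), the windows by `u_same`, each of them a `Floor.Win` (`lo = hi = 1596`: no byte of the element written), and
`In5.keep`. Exit: the assertion at the cut point and the bound of the result (`get_bits(f, 2) < 4`). -/
theorem f5a_walk {Lay : Layout} (hLay : Lay.hi = 0x1000000) {μ : Microarch} (hμ : UserX.MicroOK μ) {u₀ : State}
    (hcode : HasCodeNat Lay u₀ Vorbis.L.start_decoder.entry Vorbis.Code.code_start_decoder.nat Vorbis.L.start_decoder.size)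
    (h_gb : ∀ (others : List Obj) (frames : List (Nat × FrameLayout)) (Blk : Block → Prop) (len : Nat),
      Calls Lay μ Vorbis.WayInv (Vorbis.conv u₀) Vorbis.L.get_bits.entry (Vorbis.Spec.get_bits.spec others frames Blk len))
    {g : Ghost} {i : Nat} {A5 : Arena} {A : Arena × List Obj} {mc : Int} {n : Nat} {v : State}
    (hb : In5 u₀ g i A5 A mc n pc_F5 v) :
    ReachVia Lay μ WayInv v (fun w => AtF5b u₀ g i A5 A mc n w) := by
  have hf := hb.loop.frame
  have he := hf.entry
  v_entry he
  have hgb := h_gb A.2 g.frames' (g.Blk A) g.len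
  obtain ⟨r8, rlo, rhi, ra, flo, fhi, fstack, farena, flog, fc1, fc64, ilt, gdef, blo, bhi, btext, bstack, bdata, blog⟩ := hb.geo
  -- the three addresses as numbers (the walker sees `UInt64.ofNat R`, not `addr g.R`)
  obtain ⟨R, hR⟩ : ∃ R, R = g.R := ⟨_, rfl⟩
  obtain ⟨f, hfe⟩ : ∃ f, f = g.f := ⟨_, rfl⟩
  obtain ⟨gi, hgi⟩ : ∃ gi, gi = floorAt g v.mem i := ⟨_, rfl⟩
  have c_rip := hf.rip
  have c_rsp := hf.rsp
  have c_rbp := hb.loop.rbp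
  have c_rbx := hb.rbx
  rw [← hR] at c_rsp r8 rlo rhi ra fstack
  rw [← hfe] at c_rbp flo fhi fstack farena flog
  rw [← hgi] at c_rbx
  simp only [addr] at c_rsp c_rbp c_rbx
  have c_eq : Mem.EqOn Vorbis.L.textLo Vorbis.L.textHi u₀.mem v.mem := hf.code
  have hdf : v.flags .df = false := (show abiInv _ from hf.inv).1
  have hmx : v.mxcsr &&& 0x1F80 = 0x1F80 := (show abiInv _ from hf.inv).2
  have hsse := Vorbis.sseOK_of_abiInv hf.inv
  clear fc1 fc64 ilt gdef blo bhi btext bstack bdata blog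
  u_walk hcode [hμ.vendor] until [Vorbis.L.start_decoder.cut216] span [Vorbis.L.textLo, Vorbis.L.textHi] side (v_side)
  · -- call_inv
    v_inv
  · -- the precondition of get_bits
    have hun : ShadowUntouched v.mem s_1155cf.mem := by v_untouched
    have hrdi : (s_1155cf.reg .rdi).toNat = g.f := by
      rw [w_rdi, ← hfe]
      exact toNat_addr f (by omega)
    refine ⟨Floor.reader_pre hb.loop ?_ hun hrdi ?_, ?_⟩
    · rw [w_rsp, ← hR]
      u_omega
    · rw [w_mem]
      refine Floor.bits_push hb.loop _ 8 _ ?_ ?_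
      · rw [← hR]
        u_omega
      · u_omega
    · rw [bitsArg_def, w_rsi]
      decide
  · -- after the return of get_bits: the cut point 0x1155d4
    have hrdi : (s_1155cf.reg .rdi).toNat = f := by
      rw [w_rdi_1155cf]
      exact toNat_addr f (by omega)
    obtain ⟨hpu, hpb⟩ := w_post
    rw [hrdi] at hpb
    v_after_call w_rsp_1155cf w_mem_1155cf
    simp only [w_rdi_1155cf] at w_same
    have hun0 : ShadowUntouched v.mem s_1155cf.mem := by
      rw [w_mem_1155cf]
      v_untouched
    have hun : ShadowUntouched v.mem s_1155cfr.mem := Mem.EqOn.trans hun0 hpu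
    have hsame : Mem.SameExcept [⟨R - 408, R⟩, ⟨f + 48, f + 56⟩, ⟨f + 84, f + 96⟩, ⟨f + 136, f + 144⟩,
        ⟨f + 1484, f + 1749⟩, ⟨f + 1752, f + 1784⟩] v.mem s_1155cfr.mem := by
      u_same
    have earg : bitsArg s_1155cf = 2 := by
      rw [bitsArg_def, w_rsi_1155cf]
      rfl
    refine ReachVia.done ⟨?_, ?_⟩
    · have hws : ∀ w, w ∈ ([⟨R - 408, R⟩, ⟨f + 48, f + 56⟩, ⟨f + 84, f + 96⟩, ⟨f + 136, f + 144⟩,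
          ⟨f + 1484, f + 1749⟩, ⟨f + 1752, f + 1784⟩] : List Span) →
          Floor.Win g (floorAt g v.mem i) 1596 1596 w := by
        intro w hw
        simp only [List.mem_cons, List.mem_nil_iff, or_false] at hw
        unfold Floor.Win
        rw [← hR, ← hfe]
        rcases hw with rfl | rfl | rfl | rfl | rfl | rfl
        all_goals simp only []
        all_goals omega
      have e1 : s_1155cfr.reg .rsp = addr g.R := by
        rw [w_rsp, hR]
        rfl
      have e2 : s_1155cfr.reg .rbp = addr g.f := by
        rw [w_kept .rbp rfl, c_rbp, hfe]
        rfl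
      have e3 : s_1155cfr.reg .rbx = addr (floorAt g v.mem i) := by
        rw [w_kept .rbx rfl, c_rbx, hgi]
        rfl
      have hbits' : Bits (g.Blk A) g.len s_1155cfr.mem g.f := by
        rw [← hfe]
        exact hpb.bits
      exact hb.keep w_rip e1 e2 e3 w_inv w_eq hsame hws (by omega) (Nat.le_refl _) (Nat.le_refl _) hun hbits'
    · have h2 := hpb.result.2 (by rw [earg]; decide)
      rw [earg] at h2
      exact h2

end Vorbis.Spec.start_decoder_F5a

/-- Unit `start_decoder.F5a`: the entry assertion `BodyF5` as `In5` with the class counter cut down to 16 (`In5.of_body`), then the walk. -/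
theorem Vorbis.Spec.Worked.start_decoder_F5a_ok : Vorbis.Spec.start_decoder_F5a.Statement := by
  intro Lay hLay μ hμ u₀ hcode h_gb g i A5 A mc n v hbody
  exact Vorbis.Spec.start_decoder_F5a.f5a_walk hLay hμ hcode h_gb (In5.of_body hbody)
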